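-- pv_equiv track=rewrite | github.com/EmilienM/spypip | src/spypip/utils.py | calculate_hunk_location
-- ===== SOURCE A (Python) =====
-- def calculate_hunk_location(
--     file_lines: list[str],
--     hunk_lines: list[str],
--     _context_lines: list[str],
--     _removals: list[str],
--     additions: list[str],
-- ) -> tuple[int, int, int, int]:
--     """
--     Calculate the correct line numbers for a hunk.
--
--     Args:
--         file_lines: Lines of the target file
--         hunk_lines: Lines in the hunk
--         context_lines: Context lines in the hunk
--         removals: Lines to be removed
--         additions: Lines to be added
--
--     Returns:
--         Tuple of (old_start, old_count, new_start, new_count)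
--     """
--     # Find lines that should be present in the original file (context + removals)
--     original_lines = []
--     for line in hunk_lines:
--         if line.startswith(" ") or line.startswith("-"):
--             original_lines.append(line[1:] if line else "")
--         elif not line.startswith("+"):
--             # Line without prefix, treat as context
--             original_lines.append(line)
--
--     if not original_lines:
--         # If no original lines to match, find best position for additions
--         return 1, 0, 1, len(additions)
--
--     # Find the best match in the file
--     best_match = -1
--     best_score = -1
--
--     for start_idx in range(len(file_lines)):
--         # Check how many consecutive lines match
--         score = 0
--         for i, orig_line in enumerate(original_lines):
--             if (
--                 start_idx + i < len(file_lines)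
--                 and file_lines[start_idx + i].strip() == orig_line.strip()
--             ):
--                 score += 1
--             else:
--                 break
--
--         if score > best_score:
--             best_score = score
--             best_match = start_idx
--
--     if best_match == -1:
--         # Fallback: place at the beginning
--         best_match = 0
--
--     # Calculate counts
--     old_count = len(
--         [line for line in hunk_lines if line.startswith(" ") or line.startswith("-")]
--     )
--     new_count = len(
--         [line for line in hunk_lines if line.startswith(" ") or line.startswith("+")]
--     )
--
--     # Handle lines without prefixes as context
--     no_prefix_count = len(
--         [line for line in hunk_lines if not line.startswith(("+", "-", " "))]
--     )
--     old_count += no_prefix_count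
--     new_count += no_prefix_count
--
--     old_start = best_match + 1  # Line numbers are 1-based
--     new_start = best_match + 1
--
--     return old_start, old_count, new_start, new_count
-- ===== SOURCE B (Python) =====
-- def calculate_hunk_location(
--     file_lines: list[str],
--     hunk_lines: list[str],
--     _context_lines: list[str],
--     _removals: list[str],
--     additions: list[str],
-- ) -> tuple[int, int, int, int]:
--     # One pass over the hunk: classify by first character, build the original
--     # (context + removal) lines and both counts at the same time.
--     original = []
--     old_count = 0
--     new_count = 0
--     for line in hunk_lines:
--         c = line[:1]
--         if c == "+":
--             new_count += 1
--         elif c == " " or c == "-":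
--             original.append(line[1:])
--             old_count += 1
--             if c == " ":
--                 new_count += 1
--         else:
--             original.append(line)
--             old_count += 1
--             new_count += 1
--
--     if not original:
--         return 1, 0, 1, len(additions)
--
--     # Strip every line once, then sieve candidate start positions pattern-line
--     # by pattern-line: after step k the candidates are exactly the starts whose
--     # match length is at least k+1; stop when none survive.  The best (first
--     # maximal) match is the smallest surviving candidate.
--     f = [l.strip() for l in file_lines]
--     p = [l.strip() for l in original]
--     n = len(f)
--     candidates = list(range(n))
--     best = candidates[0] if candidates else 0
--     for k, pk in enumerate(p):
--         nxt = [i for i in candidates if i + k < n and f[i + k] == pk]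
--         if not nxt:
--             break
--         candidates = nxt
--         best = candidates[0]
--
--     return best + 1, old_count, best + 1, new_count
-- ===== Notes on version B (the rewrite author's own statement) =====
-- stated objective: alternative
-- what changed: B strips every line once up front, classifies and counts the hunk lines in a single pass, and finds the best match by sieving candidate start positions pattern-line by pattern-line (survivors of k filters are exactly the starts matching the first k lines; the first survivor of the last non-empty level is the answer) instead of A's per-position inner rescan that re-strips lines inside a nested loop.
import Mathlib
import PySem

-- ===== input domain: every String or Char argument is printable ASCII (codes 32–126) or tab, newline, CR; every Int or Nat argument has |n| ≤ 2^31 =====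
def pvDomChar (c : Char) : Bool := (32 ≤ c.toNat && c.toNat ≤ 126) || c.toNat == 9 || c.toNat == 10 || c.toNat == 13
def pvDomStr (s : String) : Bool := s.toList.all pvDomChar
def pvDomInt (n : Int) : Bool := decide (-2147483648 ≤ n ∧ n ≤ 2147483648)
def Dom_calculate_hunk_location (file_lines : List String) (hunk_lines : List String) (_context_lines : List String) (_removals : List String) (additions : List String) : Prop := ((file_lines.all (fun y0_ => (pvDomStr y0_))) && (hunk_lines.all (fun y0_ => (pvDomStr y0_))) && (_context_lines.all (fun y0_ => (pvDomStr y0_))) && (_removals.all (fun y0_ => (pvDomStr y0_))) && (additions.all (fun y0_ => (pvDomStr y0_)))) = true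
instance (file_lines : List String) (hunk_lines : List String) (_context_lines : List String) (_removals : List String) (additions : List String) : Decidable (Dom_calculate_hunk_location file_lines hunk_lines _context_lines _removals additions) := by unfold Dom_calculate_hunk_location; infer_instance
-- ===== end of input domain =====

-- B replaces A's per-position rescan (restripping every line inside the inner loop) by a
-- strip-once, sieve-by-pattern-line candidate filter and a single classification pass; return value only.

-- ===== PORT A =====
-- original_lines loop of A
def pvA_orig (hunk_lines : List String) : List String :=
  hunk_lines.foldl (fun acc line =>
    if PySem.Str.startswith line " " || PySem.Str.startswith line "-" then
      acc ++ [if line ≠ "" then PySem.Str.slice line (some 1) none else ""]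
    else if !PySem.Str.startswith line "+" then acc ++ [line]
    else acc) []

-- A's inner loop: consecutive stripped-line matches starting at start_idx, with break
def pvA_score (file_lines : List String) (start : Nat) : List String → Nat → Nat → Nat
  | [], _, score => score
  | orig_line :: rest, i, score =>
    if start + i < file_lines.length &&
       (PySem.Str.strip (file_lines.getD (start + i) "") == PySem.Str.strip orig_line)
    then pvA_score file_lines start rest (i + 1) (score + 1)
    else score

def calculate_hunk_location (file_lines : List String) (hunk_lines : List String) (_context_lines : List String) (_removals : List String) (additions : List String) : List Int :=
  let original_lines := pvA_orig hunk_lines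
  if original_lines = [] then [1, 0, 1, (additions.length : Int)]
  else
    let bsbm := (List.range file_lines.length).foldl
      (fun (st : Int × Int) start_idx =>
        let score : Int := (pvA_score file_lines start_idx original_lines 0 0 : Nat)
        if score > st.1 then (score, (start_idx : Int)) else st) (-1, -1)
    let best_match : Int := if bsbm.2 = -1 then 0 else bsbm.2
    let old_count : Int :=
      ((hunk_lines.filter (fun line => PySem.Str.startswith line " " || PySem.Str.startswith line "-")).length : Nat)
    let new_count : Int :=
      ((hunk_lines.filter (fun line => PySem.Str.startswith line " " || PySem.Str.startswith line "+")).length : Nat)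
    let no_prefix_count : Int :=
      ((hunk_lines.filter (fun line => !(PySem.Str.startswith line "+" || PySem.Str.startswith line "-" || PySem.Str.startswith line " "))).length : Nat)
    [best_match + 1, old_count + no_prefix_count, best_match + 1, new_count + no_prefix_count]

-- ===== PORT B =====
-- B's sieve: filter candidate start positions pattern-line by pattern-line
def pvB_sieve (f : List String) (n : Nat) : List String → Nat → List Nat → Nat → Nat
  | [], _, _, best => best
  | pk :: rest, k, cands, best =>
    let nxt := cands.filter (fun i => i + k < n && (f.getD (i + k) "" == pk))
    if nxt = [] then best
    else pvB_sieve f n rest (k + 1) nxt (nxt.headD 0)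

def calculate_hunk_location_alt (file_lines : List String) (hunk_lines : List String) (_context_lines : List String) (_removals : List String) (additions : List String) : List Int :=
  -- one pass: classify each hunk line by its first character, building (original, old_count, new_count)
  let st := hunk_lines.foldl (fun (st : List String × Nat × Nat) line =>
      let c := PySem.Str.slice line none (some 1)
      if c == "+" then (st.1, st.2.1, st.2.2 + 1)
      else if c == " " || c == "-" then
        (st.1 ++ [PySem.Str.slice line (some 1) none], st.2.1 + 1,
         if c == " " then st.2.2 + 1 else st.2.2)
      else (st.1 ++ [line], st.2.1 + 1, st.2.2 + 1)) ([], 0, 0)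
  if st.1 = [] then [1, 0, 1, (additions.length : Int)]
  else
    let f := file_lines.map PySem.Str.strip
    let p := st.1.map PySem.Str.strip
    let n := f.length
    let cands := List.range n
    let best := pvB_sieve f n p 0 cands (if cands = [] then 0 else cands.headD 0)
    [(best : Int) + 1, (st.2.1 : Int), (best : Int) + 1, (st.2.2 : Int)]

-- ===== PRECONDITION & SPEC =====
def Spec_calculate_hunk_location (file_lines : List String) (hunk_lines : List String) (_context_lines : List String) (_removals : List String) (additions : List String) (out : List Int) : Prop := out = calculate_hunk_location_alt file_lines hunk_lines _context_lines _removals additions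
instance (file_lines : List String) (hunk_lines : List String) (_context_lines : List String) (_removals : List String) (additions : List String) (out : List Int) : Decidable (Spec_calculate_hunk_location file_lines hunk_lines _context_lines _removals additions out) := by unfold Spec_calculate_hunk_location; infer_instance

-- ===== CLAIM (what is proved, stated in full; the proofs are below) =====
def Claim_equal_calculate_hunk_location : Prop := ∀ (file_lines : List String) (hunk_lines : List String) (_context_lines : List String) (_removals : List String) (additions : List String), Dom_calculate_hunk_location file_lines hunk_lines _context_lines _removals additions → Spec_calculate_hunk_location file_lines hunk_lines _context_lines _removals additions (calculate_hunk_location file_lines hunk_lines _context_lines _removals additions)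


-- ===== LEMMAS AND PROOFS =====

-- the common mathematical notion: number of consecutive stripped-line matches of pattern p in f starting at j
def zLen (f : List String) (n : Nat) : List String → Nat → Nat
  | [], _ => 0
  | pk :: rest, j => if j < n && (f.getD j "" == pk) then zLen f n rest (j + 1) + 1 else 0

-- the spec of A's argmax fold over range m
def fm (s : Nat → Nat) : Nat → Int × Int
  | 0 => (-1, -1)
  | m + 1 =>
    let prev := fm s m
    if ((s m : Int) > prev.1) then ((s m : Int), (m : Int)) else prev

-- per-line contribution to original_lines, as A computes it
def pvGA (line : String) : List String :=
  if PySem.Str.startswith line " " || PySem.Str.startswith line "-" then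
    [if line ≠ "" then PySem.Str.slice line (some 1) none else ""]
  else if !PySem.Str.startswith line "+" then [line]
  else []

lemma zLen_nil (f : List String) (n j : Nat) : zLen f n [] j = 0 := rfl

lemma zLen_cons (f : List String) (n : Nat) (pk : String) (rest : List String) (j : Nat) :
    zLen f n (pk :: rest) j
      = if (decide (j < n) && (f.getD j "" == pk)) = true then zLen f n rest (j + 1) + 1 else 0 := by
  simp [zLen]

lemma zLen_le (f : List String) (n : Nat) (p : List String) (j : Nat) :
    zLen f n p j ≤ p.length := by
  induction p generalizing j with
  | nil => simp [zLen_nil]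
  | cons pk rest ih =>
    rw [zLen_cons]
    split
    · simpa using ih (j+1)
    · simp

lemma zLen_succ_iff (f : List String) (n : Nat) (p : List String) (k i : Nat) (hk : k < p.length) :
    (k + 1 ≤ zLen f n p i ↔
      (k ≤ zLen f n p i ∧ (decide (i + k < n) && (f.getD (i + k) "" == p.getD k "")) = true)) := by
  induction p generalizing k i with
  | nil => simp at hk
  | cons pk rest ih =>
    rcases k with _ | k
    · rw [zLen_cons]
      by_cases h : (decide (i < n) && (f.getD i "" == pk)) = true
      · simp_all
      · simp only [if_neg h]
        simp only [Bool.and_eq_true, decide_eq_true_eq] at h ⊢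
        simp only [List.getD_cons_zero, Nat.add_zero]
        constructor
        · omega
        · rintro ⟨_, h1, h2⟩; exact absurd ⟨h1, h2⟩ h
    · rw [zLen_cons]
      by_cases h : (decide (i < n) && (f.getD i "" == pk)) = true
      · simp only [if_pos h]
        have key := ih k (i+1) (by simpa using Nat.lt_of_succ_lt_succ hk)
        have harith : i + 1 + k = i + (k+1) := by omega
        rw [harith] at key
        simp only [List.getD_cons_succ]
        constructor
        · intro hh
          rcases key.mp (by omega) with ⟨a, b⟩
          exact ⟨by omega, b⟩
        · rintro ⟨a, b⟩
          have := key.mpr ⟨by omega, b⟩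
          omega
      · simp only [if_neg h]
        simp

lemma getD_map_strip (l : List String) (j : Nat) (hj : j < l.length) :
    (l.map PySem.Str.strip).getD j "" = PySem.Str.strip (l.getD j "") := by
  rw [List.getD_eq_getElem?_getD, List.getD_eq_getElem?_getD, List.getElem?_map,
      List.getElem?_eq_getElem hj]
  simp

lemma score_eq (fl : List String) (orig : List String) (start i sc : Nat) :
    pvA_score fl start orig i sc
      = sc + zLen (fl.map PySem.Str.strip) fl.length (orig.map PySem.Str.strip) (start + i) := by
  induction orig generalizing i sc with
  | nil => simp [pvA_score, zLen_nil]
  | cons o rest ih =>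
    simp only [pvA_score, List.map_cons]
    rw [zLen_cons]
    by_cases hlt : start + i < fl.length
    · have hgd : (fl.map PySem.Str.strip).getD (start + i) "" = PySem.Str.strip (fl.getD (start + i) "") :=
        getD_map_strip fl (start + i) hlt
      by_cases heq : (PySem.Str.strip (fl.getD (start + i) "") == PySem.Str.strip o) = true
      · have c1 : (decide (start + i < fl.length) && (PySem.Str.strip (fl.getD (start + i) "") == PySem.Str.strip o)) = true := by
          simp only [Bool.and_eq_true, decide_eq_true_eq]; exact ⟨hlt, heq⟩
        have c2 : (decide (start + i < fl.length) && ((fl.map PySem.Str.strip).getD (start + i) "" == PySem.Str.strip o)) = true := by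
          rw [hgd]; exact c1
        rw [if_pos c1, if_pos c2]
        rw [ih (i+1) (sc+1)]
        have harith : start + (i + 1) = start + i + 1 := by omega
        rw [harith]; omega
      · have c1 : ¬ (decide (start + i < fl.length) && (PySem.Str.strip (fl.getD (start + i) "") == PySem.Str.strip o)) = true := by
          simp only [Bool.and_eq_true, decide_eq_true_eq]
          rintro ⟨_, hb⟩; exact heq hb
        have c2 : ¬ (decide (start + i < fl.length) && ((fl.map PySem.Str.strip).getD (start + i) "" == PySem.Str.strip o)) = true := by
          rw [hgd]; exact c1
        rw [if_neg c1, if_neg c2]; omega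
    · have c1 : ¬ (decide (start + i < fl.length) && (PySem.Str.strip (fl.getD (start + i) "") == PySem.Str.strip o)) = true := by
        simp only [Bool.and_eq_true, decide_eq_true_eq]
        rintro ⟨ha, _⟩; exact hlt ha
      have c2 : ¬ (decide (start + i < fl.length) && ((fl.map PySem.Str.strip).getD (start + i) "" == PySem.Str.strip o)) = true := by
        simp only [Bool.and_eq_true, decide_eq_true_eq]
        rintro ⟨ha, _⟩; exact hlt ha
      rw [if_neg c1, if_neg c2]; omega

lemma foldA_eq_fm (fl orig : List String) (m : Nat) :
    (List.range m).foldl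
      (fun (st : Int × Int) start_idx =>
        let score : Int := (pvA_score fl start_idx orig 0 0 : Nat)
        if score > st.1 then (score, (start_idx : Int)) else st) (-1, -1)
      = fm (fun st => zLen (fl.map PySem.Str.strip) fl.length (orig.map PySem.Str.strip) st) m := by
  induction m with
  | zero => simp [fm]
  | succ m ih =>
    rw [List.range_succ, List.foldl_append, ih]
    simp only [List.foldl_cons, List.foldl_nil, fm]
    rw [score_eq]
    simp

lemma fm_char (s : Nat → Nat) (m : Nat) (hm : 0 < m) :
    ∃ bm : Nat, fm s m = ((s bm : Int), (bm : Int)) ∧ bm < m ∧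
      (∀ j < m, s j ≤ s bm) ∧ (∀ j < bm, s j < s bm) := by
  induction m with
  | zero => omega
  | succ m ih =>
    rcases Nat.eq_zero_or_pos m with hm0 | hmpos
    · subst hm0
      refine ⟨0, ?_, by omega, ?_, by omega⟩
      · simp [fm]; omega
      · intro j hj; interval_cases j; omega
    · rcases ih hmpos with ⟨bm, hfm, hlt, hmax, hfirst⟩
      simp only [fm, hfm]
      by_cases hgt : ((s m : Int) > (s bm : Int))
      · refine ⟨m, by rw [if_pos hgt], by omega, ?_, ?_⟩
        · intro j hj
          rcases Nat.lt_succ_iff_lt_or_eq.mp hj with h | h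
          · have := hmax j h; omega
          · subst h; omega
        · intro j hj
          have := hmax j hj; omega
      · refine ⟨bm, by rw [if_neg hgt], by omega, ?_, hfirst⟩
        intro j hj
        rcases Nat.lt_succ_iff_lt_or_eq.mp hj with h | h
        · exact hmax j h
        · subst h; omega

lemma filter_range_head (P : Nat → Bool) (n b : Nat) (hb : b < n) (hP : P b = true)
    (hlt : ∀ j < b, P j = false) : ((List.range n).filter P).headD 0 = b := by
  induction b generalizing n P with
  | zero =>
    rcases n with _ | n
    · omega
    · rw [List.range_succ_eq_map]
      simp [List.filter_cons, hP]
  | succ b ih =>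
    rcases n with _ | n
    · omega
    · rw [List.range_succ_eq_map]
      rw [List.filter_cons]
      rw [hlt 0 (by omega)]
      simp only [Bool.false_eq_true, if_neg (by simp : ¬ (False : Prop))]
      rw [List.filter_map]
      have hne : (List.range n).filter (P ∘ (· + 1)) ≠ [] := by
        intro hemp
        have : b ∈ (List.range n).filter (P ∘ (· + 1)) := by
          simp [List.mem_filter, Function.comp]
          exact ⟨by omega, hP⟩
        rw [hemp] at this; simp at this
      have ihres : ((List.range n).filter (P ∘ (· + 1))).headD 0 = b := by
        apply ih (P ∘ (· + 1)) n (by omega) hP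
        intro j hj; exact hlt (j+1) (by omega)
      rcases hl : (List.range n).filter (P ∘ (· + 1)) with _ | ⟨x, xs⟩
      · exact absurd hl hne
      · rw [hl] at ihres
        simp at ihres
        simp [ihres]

lemma sieve_nil_cands (f : List String) (n : Nat) (q : List String) (k best : Nat) :
    pvB_sieve f n q k [] best = best := by
  cases q <;> simp [pvB_sieve]

lemma sieve_spec (f : List String) (n : Nat) (p : List String) :
    ∀ (q : List String) (k : Nat) (cands : List Nat) (best : Nat),
      q = p.drop k →
      cands = (List.range n).filter (fun i => decide (k ≤ zLen f n p i)) →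
      cands ≠ [] →
      best = cands.headD 0 →
      pvB_sieve f n q k cands best
        = ((List.range n).filter (fun i => decide (∀ j, j < n → zLen f n p j ≤ zLen f n p i))).headD 0 := by
  intro q
  induction q generalizing p with
  | nil =>
    intro k cands best hq hc hne hb
    have hk : p.length ≤ k := by
      by_contra h
      have := List.drop_eq_nil_iff.mp hq.symm
      omega
    obtain ⟨i0, hi0⟩ := List.exists_mem_of_ne_nil cands hne
    rw [hc] at hi0
    have hi0' := List.mem_filter.mp hi0
    have hi0n : i0 < n := List.mem_range.mp hi0'.1
    have hi0z : k ≤ zLen f n p i0 := by simpa using hi0'.2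
    have hfeq : (List.range n).filter (fun i => decide (k ≤ zLen f n p i))
        = (List.range n).filter (fun i => decide (∀ j, j < n → zLen f n p j ≤ zLen f n p i)) := by
      apply List.filter_congr
      intro i hi
      rw [decide_eq_decide]
      constructor
      · intro h j hj
        have := zLen_le f n p j
        omega
      · intro h
        have := h i0 hi0n
        omega
    show best = _
    rw [hb, hc, hfeq]
  | cons pk rest ih =>
    intro k cands best hq hc hne hb
    have hkp : k < p.length := by
      by_contra h
      have : p.drop k = [] := List.drop_eq_nil_iff.mpr (by omega)
      rw [this] at hq; simp at hq
    have hpk : p.getD k "" = pk := by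
      have h0 : (p.drop k)[0]? = some pk := by rw [← hq]; rfl
      rw [List.getElem?_drop] at h0
      rw [List.getD_eq_getElem?_getD]
      simp at h0 ⊢
      simp [h0]
    have hrest : rest = p.drop (k + 1) := by
      have := congrArg List.tail hq
      simpa [List.tail_drop] using this
    show (if cands.filter (fun i => i + k < n && (f.getD (i + k) "" == pk)) = [] then best
      else pvB_sieve f n rest (k + 1) (cands.filter (fun i => i + k < n && (f.getD (i + k) "" == pk)))
        ((cands.filter (fun i => i + k < n && (f.getD (i + k) "" == pk))).headD 0)) = _
    have hnxt : cands.filter (fun i => i + k < n && (f.getD (i + k) "" == pk))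
        = (List.range n).filter (fun i => decide (k + 1 ≤ zLen f n p i)) := by
      rw [hc, List.filter_filter]
      apply List.filter_congr
      intro i hi
      rw [Bool.eq_iff_iff]
      simp only [Bool.and_eq_true, decide_eq_true_eq]
      rw [zLen_succ_iff f n p k i hkp, hpk]
      simp only [Bool.and_eq_true, decide_eq_true_eq]
      tauto
    rw [hnxt]
    by_cases hemp : (List.range n).filter (fun i => decide (k + 1 ≤ zLen f n p i)) = []
    · rw [if_pos hemp]
      have hall : ∀ i, i < n → zLen f n p i ≤ k := by
        intro i hi
        by_contra h
        have : i ∈ (List.range n).filter (fun i => decide (k + 1 ≤ zLen f n p i)) :=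
          List.mem_filter.mpr ⟨List.mem_range.mpr hi, by simp; omega⟩
        rw [hemp] at this; simp at this
      obtain ⟨i0, hi0⟩ := List.exists_mem_of_ne_nil cands hne
      rw [hc] at hi0
      have hi0' := List.mem_filter.mp hi0
      have hi0n : i0 < n := List.mem_range.mp hi0'.1
      have hi0z : k ≤ zLen f n p i0 := by simpa using hi0'.2
      have hfeq : (List.range n).filter (fun i => decide (k ≤ zLen f n p i))
          = (List.range n).filter (fun i => decide (∀ j, j < n → zLen f n p j ≤ zLen f n p i)) := by
        apply List.filter_congr
        intro i hi
        rw [decide_eq_decide]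
        constructor
        · intro h j hj
          have := hall j hj
          omega
        · intro h
          have := h i0 hi0n
          omega
      rw [hb, hc, hfeq]
    · rw [if_neg hemp]
      exact ih p (k + 1) _ _ hrest rfl hemp rfl

-- per-line bridge: testing the first character by slice equals startswith for one-char prefixes
lemma slice1_eq_startswith (line c : String) (hc : c.toList.length = 1) :
    (PySem.Str.slice line none (some 1) == c) = PySem.Str.startswith line c := by
  have htake : ∀ (l m : List Char), m.length = 1 → ((l.take 1 = m) ↔ m <+: l) := by
    intro l m hm
    rcases m with _ | ⟨ch, rest⟩ <;> simp at hm
    rcases rest with _ | _ <;> simp at hm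
    rcases l with _ | ⟨x, xs⟩
    · simp
    · simp [List.prefix_cons_iff]
      exact eq_comm
  have h1 : (PySem.Str.slice line none (some 1) == c)
      = decide ((PySem.Str.slice line none (some 1)).toList = c.toList) := by
    rw [Bool.eq_iff_iff]; simp [String.toList_inj.symm, beq_iff_eq]
  rw [h1, Bool.eq_iff_iff]
  simp only [decide_eq_true_eq, PySem.Str.toList_slice, PySem.Chars.slice_eq_listSlice]
  rw [show ((1:Int)) = ((1:Nat):Int) from rfl, PySem.List.slice_to_natCast]
  rw [htake _ _ hc]
  rw [show PySem.Str.startswith line c = PySem.Chars.startswith line.toList c.toList from by simp]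
  exact (PySem.Chars.startswith_iff _ _).symm

lemma startswith_head (line s : String) (c : Char) (hs : s.toList = [c]) :
    PySem.Str.startswith line s = (line.toList.head? == some c) := by
  rw [show PySem.Str.startswith line s = PySem.Chars.startswith line.toList s.toList from by simp, hs]
  rw [Bool.eq_iff_iff, PySem.Chars.startswith_iff]
  rcases line.toList with _ | ⟨x, xs⟩
  · simp
  · rw [List.cons_prefix_cons]
    simp only [List.nil_prefix, and_true, Option.some.injEq, beq_iff_eq]
    exact ⟨fun h => by simp [h], fun h => by simpa [eq_comm] using h⟩

lemma pvA_orig_eq_flatMap (l : List String) : pvA_orig l = l.flatMap pvGA := by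
  have h : pvA_orig l = l.foldl (fun acc line => acc ++ pvGA line) [] := by
    unfold pvA_orig
    congr 1
    funext acc line
    unfold pvGA
    split
    · rfl
    · split <;> simp
  rw [h, PySem.List.foldl_append_eq_flatMap]
  simp

lemma pvA_orig_cons (line : String) (l : List String) :
    pvA_orig (line :: l) = pvGA line ++ pvA_orig l := by
  rw [pvA_orig_eq_flatMap, pvA_orig_eq_flatMap, List.flatMap_cons]

-- B's classification fold, related to A's original_lines fold and A's three filters
lemma classify_spec (l : List String) (st : List String × Nat × Nat) :
    l.foldl (fun (st : List String × Nat × Nat) line =>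
      let c := PySem.Str.slice line none (some 1)
      if c == "+" then (st.1, st.2.1, st.2.2 + 1)
      else if c == " " || c == "-" then
        (st.1 ++ [PySem.Str.slice line (some 1) none], st.2.1 + 1,
         if c == " " then st.2.2 + 1 else st.2.2)
      else (st.1 ++ [line], st.2.1 + 1, st.2.2 + 1)) st
    = (st.1 ++ pvA_orig l,
       st.2.1 + ((l.filter (fun line => PySem.Str.startswith line " " || PySem.Str.startswith line "-")).length
         + (l.filter (fun line => !(PySem.Str.startswith line "+" || PySem.Str.startswith line "-" || PySem.Str.startswith line " "))).length),
       st.2.2 + ((l.filter (fun line => PySem.Str.startswith line " " || PySem.Str.startswith line "+")).length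
         + (l.filter (fun line => !(PySem.Str.startswith line "+" || PySem.Str.startswith line "-" || PySem.Str.startswith line " "))).length)) := by
  induction l generalizing st with
  | nil => simp [pvA_orig]
  | cons line l ih =>
    rw [List.foldl_cons, ih, pvA_orig_cons]
    simp only [List.filter_cons]
    have hplus : (PySem.Str.slice line none (some 1) == "+") = PySem.Str.startswith line "+" :=
      slice1_eq_startswith line "+" (by decide)
    have hsp : (PySem.Str.slice line none (some 1) == " ") = PySem.Str.startswith line " " :=
      slice1_eq_startswith line " " (by decide)
    have hmin : (PySem.Str.slice line none (some 1) == "-") = PySem.Str.startswith line "-" :=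
      slice1_eq_startswith line "-" (by decide)
    have hP := startswith_head line "+" '+' (by decide)
    have hS := startswith_head line " " ' ' (by decide)
    have hM := startswith_head line "-" '-' (by decide)
    simp only [hplus, hsp, hmin, hP, hS, hM, pvGA]
    rcases hL : line.toList with _ | ⟨x, xs⟩
    · have hline : line = "" := String.toList_inj.mp (by simp [hL])
      subst hline
      simp
      omega
    · have hline : line ≠ "" := by
        intro h; rw [h] at hL; simp at hL
      simp only [hL, List.head?_cons]
      by_cases hx1 : x = '+'
      · simp [hx1, hline]
        omega
      · by_cases hx2 : x = ' '
        · simp [hx1, hx2, hline]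
          omega
        · by_cases hx3 : x = '-'
          · simp [hx1, hx2, hx3, hline]
            omega
          · simp [hx1, hx2, hx3, hline]
            omega

-- ===== VERDICT (by name: the statement is the Claim_ definition above) =====
theorem calculate_hunk_location_spec : Claim_equal_calculate_hunk_location := by
  intro file_lines hunk_lines _context_lines _removals additions _dom
  unfold Spec_calculate_hunk_location
  unfold calculate_hunk_location calculate_hunk_location_alt
  rw [classify_spec hunk_lines ([], 0, 0)]
  simp only [List.nil_append, Nat.zero_add]
  by_cases ho : pvA_orig hunk_lines = []
  · simp [ho]
  · rw [if_neg ho, if_neg ho]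
    by_cases hfl : file_lines = []
    · subst hfl
      simp [sieve_nil_cands]
    · have hn : 0 < file_lines.length := List.length_pos_iff.mpr hfl
      rw [foldA_eq_fm file_lines (pvA_orig hunk_lines) file_lines.length]
      obtain ⟨bm, hfm, hbm, hmax, hfirst⟩ :=
        fm_char (fun st => zLen (file_lines.map PySem.Str.strip) file_lines.length
          ((pvA_orig hunk_lines).map PySem.Str.strip) st) file_lines.length hn
      rw [hfm]
      have hbm_ne : ((bm : Int) ≠ -1) := by omega
      rw [if_neg (by simpa using hbm_ne)]
      have hlen : (List.map PySem.Str.strip file_lines).length = file_lines.length :=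
        List.length_map ..
      rw [hlen]
      have hcands : List.range file_lines.length
          = (List.range file_lines.length).filter
              (fun i => decide (0 ≤ zLen (List.map PySem.Str.strip file_lines) file_lines.length
                (List.map PySem.Str.strip (pvA_orig hunk_lines)) i)) := by
        simp
      have hcne : List.range file_lines.length ≠ [] := by
        simp only [ne_eq, List.range_eq_nil]
        omega
      rw [if_neg hcne]
      rw [sieve_spec (List.map PySem.Str.strip file_lines) file_lines.length
        (List.map PySem.Str.strip (pvA_orig hunk_lines))
        (List.map PySem.Str.strip (pvA_orig hunk_lines)) 0
        (List.range file_lines.length) ((List.range file_lines.length).headD 0)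
        (by simp) hcands hcne rfl]
      have hhead : ((List.range file_lines.length).filter
          (fun i => decide (∀ j, j < file_lines.length →
            zLen (List.map PySem.Str.strip file_lines) file_lines.length
              (List.map PySem.Str.strip (pvA_orig hunk_lines)) j
            ≤ zLen (List.map PySem.Str.strip file_lines) file_lines.length
              (List.map PySem.Str.strip (pvA_orig hunk_lines)) i))).headD 0 = bm := by
        apply filter_range_head _ _ bm hbm
        · simp only [decide_eq_true_eq]
          exact fun j hj => hmax j hj
        · intro j hj
          simp only [decide_eq_false_iff_not]
          intro hcon
          have h1 := hcon bm hbm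
          have h2 := hfirst j hj
          omega
      rw [hhead]
      push_cast
      rfl
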